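-- pv_equiv track=rewrite | github.com/MichaelTroelsen/SIDM2conv | archive/experiments/create_proper_sf2.py | convert_orderlists_to_model
-- ===== SOURCE A (Python) =====
-- def convert_orderlists_to_model(orderlists):
--     """Convert orderlist format to (transpose, seq_idx) tuples."""
--     converted = []
--
--     for orderlist in orderlists:
--         entries = []
--         # Orderlist is: [A0, 00, A0, 01, ..., A0, 7F]
--         # Convert to list of (transpose, seq_idx) tuples
--         i = 0
--         while i < len(orderlist) - 1:
--             transpose = orderlist[i]
--             seq_idx = orderlist[i + 1]
--
--             if seq_idx == 0x7F:  # End marker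
--                 break
--
--             entries.append((transpose, seq_idx))
--             i += 2
--
--         converted.append(entries)
--
--     return converted
-- ===== SOURCE B (Python) =====
-- def convert_orderlists_to_model(orderlists):
--     """Convert orderlist format to (transpose, seq_idx) tuples."""
--     converted = []
--     for ol in orderlists:
--         # Pass 1: locate the cut point -- the first 0x7F in a seq_idx (odd)
--         # slot -- defaulting to the even-length prefix (drops a trailing
--         # unpaired byte).
--         cut = len(ol) // 2 * 2
--         for j in range(1, len(ol), 2):
--             if ol[j] == 0x7F:
--                 cut = j - 1
--                 break
--         # Pass 2: build the pairs from the truncated prefix.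
--         converted.append([(ol[k], ol[k + 1]) for k in range(0, cut, 2)])
--     return converted
-- ===== Notes on version B (the rewrite author's own statement) =====
-- stated objective: alternative
-- what changed: Two staged passes instead of one pair-and-break loop: pass 1 scans only the odd (seq_idx) slots to locate the 0x7F cut point, pass 2 rebuilds the (transpose, seq_idx) pairs from the truncated prefix by index comprehension.
import Mathlib
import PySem

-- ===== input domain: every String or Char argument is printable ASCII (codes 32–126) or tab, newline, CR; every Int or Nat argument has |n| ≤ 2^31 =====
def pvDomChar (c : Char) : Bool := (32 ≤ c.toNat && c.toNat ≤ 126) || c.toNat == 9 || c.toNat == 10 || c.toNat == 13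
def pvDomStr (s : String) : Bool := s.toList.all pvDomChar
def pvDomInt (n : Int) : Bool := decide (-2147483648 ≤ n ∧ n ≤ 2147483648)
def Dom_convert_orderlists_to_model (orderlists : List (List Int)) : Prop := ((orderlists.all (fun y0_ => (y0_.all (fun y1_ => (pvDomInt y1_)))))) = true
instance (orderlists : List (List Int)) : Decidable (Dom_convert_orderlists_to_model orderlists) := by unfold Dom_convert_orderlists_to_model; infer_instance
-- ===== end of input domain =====

-- B replaces A's single pair-and-break loop by two staged passes (find the 0x7F cut
-- point among the odd slots, then rebuild pairs from the truncated prefix);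
-- equivalence of return values is proved for all inputs.

-- ===== PORT A =====
-- while i < len(orderlist) - 1: read orderlist[i], orderlist[i+1]; break on 0x7F; else append and i += 2
def pvALoop (ol : List Int) (i : Nat) : List (Int × Int) :=
  if h : i < ol.length - 1 then
    let transpose := ol[i]'(by omega)
    let seq_idx := ol[i + 1]'(by omega)
    if seq_idx == 127 then []
    else (transpose, seq_idx) :: pvALoop ol (i + 2)
  else []
termination_by ol.length - i

def convert_orderlists_to_model (orderlists : List (List Int)) : List (List (Int × Int)) :=
  orderlists.map (fun orderlist => pvALoop orderlist 0)

-- ===== PORT B =====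
-- pass 1: for j in range(1, len(ol), 2): if ol[j] == 0x7F: cut = j - 1; break
-- (default cut = len(ol) // 2 * 2)
def pvFindCut (ol : List Int) (j : Nat) : Nat :=
  if h : j < ol.length then
    if ol[j] == 127 then j - 1 else pvFindCut ol (j + 2)
  else ol.length / 2 * 2
termination_by ol.length - j

-- pass 2: [(ol[k], ol[k+1]) for k in range(0, cut, 2)]
-- (getD is exact here: cut is even and ≤ len(ol), so k and k+1 are in bounds)
def pvBuild (ol : List Int) (cut k : Nat) : List (Int × Int) :=
  if k < cut then (ol.getD k 0, ol.getD (k + 1) 0) :: pvBuild ol cut (k + 2) else []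
termination_by cut - k

def convert_orderlists_to_model_alt (orderlists : List (List Int)) : List (List (Int × Int)) :=
  orderlists.map (fun ol => pvBuild ol (pvFindCut ol 1) 0)

-- ===== PRECONDITION & SPEC =====
def Spec_convert_orderlists_to_model (orderlists : List (List Int)) (out : List (List (Int × Int))) : Prop := out = convert_orderlists_to_model_alt orderlists
instance (orderlists : List (List Int)) (out : List (List (Int × Int))) : Decidable (Spec_convert_orderlists_to_model orderlists out) := by unfold Spec_convert_orderlists_to_model; infer_instance

-- ===== CLAIM (what is proved, stated in full; the proofs are below) =====
def Claim_equal_convert_orderlists_to_model : Prop := ∀ (orderlists : List (List Int)), Dom_convert_orderlists_to_model orderlists → Spec_convert_orderlists_to_model orderlists (convert_orderlists_to_model orderlists)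

-- ===== LEMMAS AND PROOFS =====
theorem pvFindCut_ge (ol : List Int) (j : Nat) (hj : j ≤ ol.length) :
    j - 1 ≤ pvFindCut ol j := by
  fun_induction pvFindCut ol j with
  | case1 j h h127 => omega
  | case2 j h h127 ih =>
    by_cases h2 : j + 2 ≤ ol.length
    · have := ih h2; omega
    · rw [pvFindCut]; simp only [dif_neg (by omega : ¬ j + 2 < ol.length)]; omega
  | case3 j h => omega

theorem pvFindCut_le (ol : List Int) (j : Nat) :
    pvFindCut ol j ≤ ol.length / 2 * 2 := by
  fun_induction pvFindCut ol j with
  | case1 j h h127 => omega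
  | case2 j h h127 ih => exact ih
  | case3 j h => omega

theorem pvALoop_eq (ol : List Int) (i : Nat) (hev : i % 2 = 0) :
    pvALoop ol i = pvBuild ol (pvFindCut ol (i + 1)) i := by
  fun_induction pvALoop ol i with
  | case1 i h t s =>
    -- seq_idx = 127: cut = i, build yields []
    have hs : ol[i + 1]'(by omega) == (127 : Int) := by simpa using s
    rw [pvFindCut]
    simp only [dif_pos (by omega : i + 1 < ol.length), if_pos hs]
    rw [pvBuild]
    simp
  | case2 i h t s hs ih =>
    have hs' : ¬ (ol[i + 1]'(by omega) == (127 : Int)) := by simpa using hs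
    have hcut : pvFindCut ol (i + 1) = pvFindCut ol (i + 3) := by
      rw [pvFindCut]
      simp only [dif_pos (by omega : i + 1 < ol.length), if_neg hs']
    have hilt : i < pvFindCut ol (i + 3) := by
      by_cases h3 : i + 3 ≤ ol.length
      · have := pvFindCut_ge ol (i + 3) h3; omega
      · -- i + 3 = len + 1 (since i < len - 1), so i is even → len even → cut = len
        rw [pvFindCut]
        simp only [dif_neg (by omega : ¬ i + 3 < ol.length)]
        omega
    rw [hcut, pvBuild]
    simp only [if_pos hilt]
    rw [ih (by omega), show i + 2 + 1 = i + 3 from by omega]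
    rw [List.getD_eq_getElem ol 0 (by omega : i < ol.length),
        List.getD_eq_getElem ol 0 (by omega : i + 1 < ol.length)]
  | case3 i h =>
    rw [pvBuild]
    have hle := pvFindCut_le ol (i + 1)
    by_cases hlen : i + 1 ≤ ol.length
    · -- i = len - 1, i even → len odd → len/2*2 = len - 1 = i, and cut ≤ that
      simp only [if_neg (by omega : ¬ i < pvFindCut ol (i + 1))]
    · simp only [if_neg (by omega : ¬ i < pvFindCut ol (i + 1))]

-- ===== VERDICT (by name: the statement is the Claim_ definition above) =====
theorem convert_orderlists_to_model_spec : Claim_equal_convert_orderlists_to_model := by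
  intro orderlists _
  unfold Spec_convert_orderlists_to_model convert_orderlists_to_model convert_orderlists_to_model_alt
  simp only [List.map_inj_left]
  intro ol _
  exact pvALoop_eq ol 0 rfl
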